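-- pv_equiv track=rewrite | github.com/InputBlackBoxOutput/sunfish-api | app.py | convert_piece_placement
-- ===== SOURCE A (Python) =====
-- def convert_piece_placement(piece_placement):
--     out = "         \n         \n "
--     count = 0
--     for c in piece_placement:
--         if c.isalpha():
--             out += c
--             count += 1
--         elif c.isnumeric():
--             for _ in range(int(c)):
--                 out += '.'
--                 count += 1
--
--                 # Add newline when dealing with dots
--                 if count == 8:
--                     out += '\n '
--                     count = 0
--
--         if count == 8:
--             out += '\n '
--             count = 0
--
--     out += "         \n         \n'"
--     return out
-- ===== SOURCE B (Python) =====
-- def convert_piece_placement(piece_placement):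
--     # Phase 1: flatten the placement into one string of cells.
--     cells = []
--     for c in piece_placement:
--         if c.isalpha():
--             cells.append(c)
--         elif c.isnumeric():
--             cells.append('.' * int(c))
--     s = ''.join(cells)
--     # Phase 2: chunk the flat cells into groups of 8, newline after each full group.
--     parts = []
--     for i in range(0, len(s), 8):
--         chunk = s[i:i + 8]
--         parts.append(chunk)
--         if len(chunk) == 8:
--             parts.append('\n ')
--     return "         \n         \n " + ''.join(parts) + "         \n         \n'"
-- ===== Notes on version B (the rewrite author's own statement) =====
-- stated objective: simpler
-- what changed: Replaces A's single loop with a running cell counter and mid-digit newline logic by two phases: flatten the placement into one string of cells, then slice it into groups of 8 appending the row separator after each full group.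
import Mathlib
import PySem

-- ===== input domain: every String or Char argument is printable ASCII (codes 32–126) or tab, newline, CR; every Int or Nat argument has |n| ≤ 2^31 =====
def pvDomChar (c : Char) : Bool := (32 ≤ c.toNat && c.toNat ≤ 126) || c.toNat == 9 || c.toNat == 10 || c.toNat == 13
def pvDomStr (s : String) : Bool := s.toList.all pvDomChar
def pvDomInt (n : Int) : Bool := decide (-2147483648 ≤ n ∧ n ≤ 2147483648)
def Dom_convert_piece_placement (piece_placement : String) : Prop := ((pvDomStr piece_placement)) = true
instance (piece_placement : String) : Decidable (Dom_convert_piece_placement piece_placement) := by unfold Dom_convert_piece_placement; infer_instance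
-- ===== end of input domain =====

-- B replaces A's running counter and mid-digit newline logic by flatten-then-chunk-by-8 (simpler decomposition).

-- ===== PORT A =====
-- inner `for _ in range(int(c))` loop of A: append a dot, bump the count, newline at 8
def convA_dots : Nat → List Char → Nat → List Char × Nat
  | 0, out, count => (out, count)
  | Nat.succ n, out, count =>
    let out := out ++ ['.']
    let count := count + 1
    if count = 8 then convA_dots n (out ++ ['\n', ' ']) 0
    else convA_dots n out count

-- outer `for c in piece_placement` loop of A (isalpha/isnumeric are exact on the ASCII domain)
def convA_loop : List Char → List Char → Nat → List Char
  | [], out, _ => out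
  | c :: cs, out, count =>
    if c.isAlpha then
      let out := out ++ [c]
      let count := count + 1
      if count = 8 then convA_loop cs (out ++ ['\n', ' ']) 0
      else convA_loop cs out count
    else if c.isDigit then
      let r := convA_dots (c.toNat - 48) out count
      if r.2 = 8 then convA_loop cs (r.1 ++ ['\n', ' ']) 0
      else convA_loop cs r.1 r.2
    else
      if count = 8 then convA_loop cs (out ++ ['\n', ' ']) 0
      else convA_loop cs out count

def convert_piece_placement (piece_placement : String) : String :=
  String.mk (convA_loop piece_placement.toList "         \n         \n ".toList 0
             ++ "         \n         \n'".toList)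

-- ===== PORT B =====
-- phase 1 of Source B: flatten into one string of cells (a letter, or int(c) dots)
def convB_cells : List Char → List Char
  | [] => []
  | c :: cs =>
    (if c.isAlpha then [c]
     else if c.isDigit then List.replicate (c.toNat - 48) '.'
     else []) ++ convB_cells cs

-- phase 2 of Source B: the `for i in range(0, len(s), 8)` slice loop
def convB_chunks (s : List Char) : List Char :=
  if s = [] then []
  else s.take 8 ++ (if (s.take 8).length = 8 then ['\n', ' '] else [])
       ++ convB_chunks (s.drop 8)
termination_by s.length
decreasing_by
  rename_i h
  have hpos : 0 < s.length := List.length_pos_iff.mpr h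
  simp only [List.length_drop]
  omega

def convert_piece_placement_alt (piece_placement : String) : String :=
  String.mk ("         \n         \n ".toList
             ++ convB_chunks (convB_cells piece_placement.toList)
             ++ "         \n         \n'".toList)

-- ===== PRECONDITION & SPEC =====
def Spec_convert_piece_placement (piece_placement : String) (out : String) : Prop := out = convert_piece_placement_alt piece_placement
instance (piece_placement : String) (out : String) : Decidable (Spec_convert_piece_placement piece_placement out) := by unfold Spec_convert_piece_placement; infer_instance

-- ===== CLAIM (what is proved, stated in full; the proofs are below) =====
def Claim_equal_convert_piece_placement : Prop := ∀ (piece_placement : String), Dom_convert_piece_placement piece_placement → Spec_convert_piece_placement piece_placement (convert_piece_placement piece_placement)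

-- ===== LEMMAS AND PROOFS =====

-- characterisation of A's loop output: emit cells one by one, newline after every 8th
def pvEmit : Nat → List Char → List Char × Nat
  | count, [] => ([], count)
  | count, c :: s =>
    if count + 1 = 8 then
      let r := pvEmit 0 s
      (c :: '\n' :: ' ' :: r.1, r.2)
    else
      let r := pvEmit (count + 1) s
      (c :: r.1, r.2)

theorem pvEmit_count_lt (s : List Char) : ∀ count, count < 8 → (pvEmit count s).2 < 8 := by
  induction s with
  | nil => intro count h; simpa [pvEmit] using h
  | cons c s ih =>
    intro count h
    by_cases h8 : count + 1 = 8
    · simpa [pvEmit, h8] using ih 0 (by omega)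
    · simpa [pvEmit, h8] using ih (count + 1) (by omega)

theorem pvEmit_append (s : List Char) : ∀ t count,
    pvEmit count (s ++ t)
      = ((pvEmit count s).1 ++ (pvEmit (pvEmit count s).2 t).1,
         (pvEmit (pvEmit count s).2 t).2) := by
  induction s with
  | nil => intro t count; simp [pvEmit]
  | cons c s ih =>
    intro t count
    by_cases h8 : count + 1 = 8 <;> simp [pvEmit, h8, ih]

theorem convA_dots_eq (n : Nat) : ∀ out count, count < 8 →
    convA_dots n out count
      = (out ++ (pvEmit count (List.replicate n '.')).1,
         (pvEmit count (List.replicate n '.')).2) := by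
  induction n with
  | zero => intro out count _; simp [convA_dots, pvEmit]
  | succ n ih =>
    intro out count h
    by_cases h8 : count + 1 = 8
    · simp [convA_dots, h8, ih _ 0 (by omega), pvEmit, List.replicate_succ]
    · have hlt : count + 1 < 8 := by omega
      simp [convA_dots, h8, ih _ (count + 1) hlt, pvEmit, List.replicate_succ]

theorem convA_loop_eq (cs : List Char) : ∀ out count, count < 8 →
    convA_loop cs out count = out ++ (pvEmit count (convB_cells cs)).1 := by
  induction cs with
  | nil => intro out count _; simp [convA_loop, convB_cells, pvEmit]
  | cons c cs ih =>
    intro out count h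
    by_cases ha : c.isAlpha
    · by_cases h8 : count + 1 = 8
      · simp [convA_loop, convB_cells, ha, h8, ih _ 0 (by omega), pvEmit]
      · have hlt : count + 1 < 8 := by omega
        simp [convA_loop, convB_cells, ha, h8, ih _ (count + 1) hlt, pvEmit]
    · by_cases hd : c.isDigit
      · have hdots := convA_dots_eq (c.toNat - 48) out count h
        have hcnt : (pvEmit count (List.replicate (c.toNat - 48) '.')).2 < 8 :=
          pvEmit_count_lt _ count h
        have hne : (pvEmit count (List.replicate (c.toNat - 48) '.')).2 ≠ 8 := by omega
        simp [convA_loop, convB_cells, ha, hd, hdots, hne, ih _ _ hcnt, pvEmit_append]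
      · have hne : count ≠ 8 := by omega
        simp [convA_loop, convB_cells, ha, hd, hne, ih _ count h]

-- chunk characterisation of pvEmit
theorem pvEmit_take (s : List Char) : ∀ count, count < 8 →
    (pvEmit count s).1
      = s.take (8 - count)
        ++ (if 8 - count ≤ s.length
            then '\n' :: ' ' :: (pvEmit 0 (s.drop (8 - count))).1
            else []) := by
  induction s with
  | nil =>
    intro count h
    have : ¬ (8 - count ≤ 0) := by omega
    simp [pvEmit, this]
  | cons c s ih =>
    intro count h
    by_cases h8 : count + 1 = 8
    · have h1 : 8 - count = 1 := by omega
      simp [pvEmit, h8, h1]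
    · have hlt : count + 1 < 8 := by omega
      obtain ⟨k, hk⟩ : ∃ k, 8 - count = k + 1 := ⟨7 - count, by omega⟩
      have hk' : 8 - (count + 1) = k := by omega
      have hcond : (k + 1 ≤ s.length + 1) ↔ (k ≤ s.length) := by omega
      simp only [pvEmit, h8, if_false, ih (count + 1) hlt, hk', hk,
        List.take_succ_cons, List.drop_succ_cons, List.length_cons, hcond]
      by_cases hc : k ≤ s.length <;> simp [hc]

theorem pvEmit_chunks : ∀ n (s : List Char), s.length ≤ n →
    (pvEmit 0 s).1 = convB_chunks s := by
  intro n
  induction n with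
  | zero =>
    intro s hs
    have hnil : s = [] := by
      cases s with | nil => rfl | cons a t => simp at hs
    rw [hnil, convB_chunks.eq_def]
    simp [pvEmit]
  | succ n ih =>
    intro s hs
    by_cases hnil : s = []
    · rw [hnil, convB_chunks.eq_def]
      simp [pvEmit]
    · rw [convB_chunks.eq_def]
      have h0 := pvEmit_take s 0 (by omega)
      simp only [Nat.sub_zero] at h0
      by_cases hlen : 8 ≤ s.length
      · have htk : (s.take 8).length = 8 := by simp [hlen]
        have hdrop : (s.drop 8).length ≤ n := by simp; omega
        rw [h0, ih (s.drop 8) hdrop]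
        simp [hlen, hnil, htk]
      · have htk : (s.take 8).length ≠ 8 := by
          simp [List.length_take]; omega
        have hdrop : s.drop 8 = [] := by
          apply List.eq_nil_of_length_eq_zero
          simp; omega
        rw [h0, hdrop, convB_chunks.eq_def]
        simp [hlen, hnil, htk]

-- ===== VERDICT (by name: the statement is the Claim_ definition above) =====
theorem convert_piece_placement_spec : Claim_equal_convert_piece_placement := by
  intro p _
  unfold Spec_convert_piece_placement convert_piece_placement convert_piece_placement_alt
  rw [convA_loop_eq p.toList _ 0 (by omega),
      pvEmit_chunks (convB_cells p.toList).length _ (le_refl _)]
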